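-- pv_equiv track=rewrite | github.com/eeleedev/LeetCode-CodeTree | 250206/함수를 이용한 369 게임/369-games-using-functions.py | count_func
-- ===== SOURCE A (Python) =====
-- def tsn(num):
--     temp1 = num // 10
--     temp2 = num % 10
--     if temp1 == 3 or temp1 == 6 or temp1 == 9:
--         return True
--     elif temp2 == 3 or temp2 == 6 or temp2 == 9:
--         return True
--     else:
--         return False
--
-- def count_func(a,b):
--     counter = 0
--     for i in range(a,b+1):
--         if tsn(i):
--                 counter += 1
--         elif i%3==0:
--             counter += 1
--     return counter
-- ===== SOURCE B (Python) =====
-- def count_func(a, b):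
--     if a > b:
--         return 0
--     def G(n):
--         return (n // 3
--                 + (n - 3) // 10 + (n - 6) // 10 + (n - 9) // 10
--                 - (n - 3) // 30 - (n - 6) // 30 - (n - 9) // 30)
--     extras = (31, 32, 34, 35, 37, 38, 61, 62, 64, 65, 67, 68,
--               91, 92, 94, 95, 97, 98)
--     return G(b) - G(a - 1) + sum(1 for e in extras if a <= e <= b)
-- ===== Notes on version B (the rewrite author's own statement) =====
-- stated objective: faster
-- what changed: Replaces A's per-integer loop over [a,b] with an O(1) closed form: inclusion-exclusion floor-division counts for the periodic part of the predicate (multiples of 3 and last digit 3/6/9) plus an 18-element literal list of the only numbers (31..98 in the 30s/60s/90s decades) where A's tens-digit test fires alone.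
import Mathlib
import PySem

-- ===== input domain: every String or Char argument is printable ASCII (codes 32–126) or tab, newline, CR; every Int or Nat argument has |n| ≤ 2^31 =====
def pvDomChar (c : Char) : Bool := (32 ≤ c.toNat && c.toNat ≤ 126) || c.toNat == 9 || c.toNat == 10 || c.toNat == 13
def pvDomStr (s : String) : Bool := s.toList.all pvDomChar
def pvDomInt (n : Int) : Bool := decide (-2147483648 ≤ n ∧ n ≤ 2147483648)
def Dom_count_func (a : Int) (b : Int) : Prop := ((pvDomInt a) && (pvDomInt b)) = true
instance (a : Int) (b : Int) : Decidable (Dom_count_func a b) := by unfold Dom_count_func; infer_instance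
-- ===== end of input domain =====

-- B replaces A's O(b-a) loop by an O(1) closed form: inclusion-exclusion floor-division
-- counts of the periodic part of the predicate plus the 18 fixed numbers where only
-- the tens-digit test fires (31,32,34,35,37,38 and the same in the 60s and 90s).

-- ===== PORT A =====
def tsn (num : Int) : Bool :=
  let temp1 := PySem.Int.floordiv num 10
  let temp2 := PySem.Int.mod num 10
  if temp1 = 3 ∨ temp1 = 6 ∨ temp1 = 9 then true
  else if temp2 = 3 ∨ temp2 = 6 ∨ temp2 = 9 then true
  else false

def count_func (a : Int) (b : Int) : Int :=
  (PySem.List.pyRange a (b + 1) 1).foldl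
    (fun counter i =>
      if tsn i then counter + 1
      else if PySem.Int.mod i 3 = 0 then counter + 1
      else counter) 0

-- ===== PORT B =====
def pvG (n : Int) : Int :=
  PySem.Int.floordiv n 3
    + PySem.Int.floordiv (n - 3) 10 + PySem.Int.floordiv (n - 6) 10 + PySem.Int.floordiv (n - 9) 10
    - PySem.Int.floordiv (n - 3) 30 - PySem.Int.floordiv (n - 6) 30 - PySem.Int.floordiv (n - 9) 30

def pvExtras : List Int := [31, 32, 34, 35, 37, 38, 61, 62, 64, 65, 67, 68, 91, 92, 94, 95, 97, 98]

def count_func_alt (a : Int) (b : Int) : Int :=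
  if a > b then 0
  else pvG b - pvG (a - 1)
    + ((pvExtras.countP (fun e => decide (a ≤ e) && decide (e ≤ b)) : Nat) : Int)

-- ===== PRECONDITION & SPEC =====
def Spec_count_func (a : Int) (b : Int) (out : Int) : Prop := out = count_func_alt a b
instance (a : Int) (b : Int) (out : Int) : Decidable (Spec_count_func a b out) := by unfold Spec_count_func; infer_instance

-- ===== CLAIM (what is proved, stated in full; the proofs are below) =====
def Claim_equal_count_func : Prop := ∀ (a : Int) (b : Int), Dom_count_func a b → Spec_count_func a b (count_func a b)

-- ===== LEMMAS AND PROOFS =====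

-- floor-division forms rewritten into ediv/emod so omega can reason about them
theorem pvG_ediv (n : Int) : pvG n =
    n / 3 + (n - 3) / 10 + (n - 6) / 10 + (n - 9) / 10
      - (n - 3) / 30 - (n - 6) / 30 - (n - 9) / 30 := by
  unfold pvG
  simp only [PySem.Int.floordiv_eq_ediv_of_pos (by norm_num : (0:Int) < 3),
    PySem.Int.floordiv_eq_ediv_of_pos (by norm_num : (0:Int) < 10),
    PySem.Int.floordiv_eq_ediv_of_pos (by norm_num : (0:Int) < 30)]

-- the loop body's predicate, in ediv/emod form
abbrev pvP (i : Int) : Prop :=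
  i / 10 = 3 ∨ i / 10 = 6 ∨ i / 10 = 9 ∨ i % 10 = 3 ∨ i % 10 = 6 ∨ i % 10 = 9 ∨ i % 3 = 0

theorem pv_body_eq (counter i : Int) :
    (if tsn i then counter + 1
     else if PySem.Int.mod i 3 = 0 then counter + 1
     else counter) = if pvP i then counter + 1 else counter := by
  unfold tsn pvP
  simp only [PySem.Int.floordiv_eq_ediv_of_pos (by norm_num : (0:Int) < 10),
    PySem.Int.mod_eq_emod_of_pos (by norm_num : (0:Int) < 10),
    PySem.Int.mod_eq_emod_of_pos (by norm_num : (0:Int) < 3)]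
  by_cases h1 : i / 10 = 3 ∨ i / 10 = 6 ∨ i / 10 = 9 <;>
  by_cases h2 : i % 10 = 3 ∨ i % 10 = 6 ∨ i % 10 = 9 <;>
  by_cases h3 : i % 3 = 0 <;>
  simp [h1, h2, h3]

-- the periodic part of pvP
abbrev pvQ (i : Int) : Prop := i % 3 = 0 ∨ i % 10 = 3 ∨ i % 10 = 6 ∨ i % 10 = 9

-- inclusion-exclusion of the step indicators
theorem pvQ_ind (n : Int) :
    (if n % 3 = 0 then (1:Int) else 0) + (if n % 10 = 3 then 1 else 0)
      + (if n % 10 = 6 then 1 else 0) + (if n % 10 = 9 then 1 else 0)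
      - (if n % 30 = 3 then 1 else 0) - (if n % 30 = 6 then 1 else 0)
      - (if n % 30 = 9 then 1 else 0)
    = if pvQ n then 1 else 0 := by
  unfold pvQ
  split_ifs <;> omega

-- one step of the closed-form counter for the periodic part
theorem pvG_step (n : Int) : pvG n = pvG (n - 1) + (if pvQ n then 1 else 0) := by
  rw [pvG_ediv, pvG_ediv, ← pvQ_ind n]
  have h1 : n / 3 = (n - 1) / 3 + (if n % 3 = 0 then (1:Int) else 0) := by
    by_cases h : n % 3 = 0 <;> simp [h] <;> omega
  have h2 : (n - 3) / 10 = (n - 1 - 3) / 10 + (if n % 10 = 3 then (1:Int) else 0) := by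
    by_cases h : n % 10 = 3 <;> simp [h] <;> omega
  have h3 : (n - 6) / 10 = (n - 1 - 6) / 10 + (if n % 10 = 6 then (1:Int) else 0) := by
    by_cases h : n % 10 = 6 <;> simp [h] <;> omega
  have h4 : (n - 9) / 10 = (n - 1 - 9) / 10 + (if n % 10 = 9 then (1:Int) else 0) := by
    by_cases h : n % 10 = 9 <;> simp [h] <;> omega
  have h5 : (n - 3) / 30 = (n - 1 - 3) / 30 + (if n % 30 = 3 then (1:Int) else 0) := by
    by_cases h : n % 30 = 3 <;> simp [h] <;> omega
  have h6 : (n - 6) / 30 = (n - 1 - 6) / 30 + (if n % 30 = 6 then (1:Int) else 0) := by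
    by_cases h : n % 30 = 6 <;> simp [h] <;> omega
  have h7 : (n - 9) / 30 = (n - 1 - 9) / 30 + (if n % 30 = 9 then (1:Int) else 0) := by
    by_cases h : n % 30 = 9 <;> simp [h] <;> omega
  rw [h1, h2, h3, h4, h5, h6, h7]
  ring

-- one step of the extras counter
theorem pvExtras_step (a m : Int) (ham : a ≤ m) (l : List Int) :
    (l.countP (fun e => decide (a ≤ e) && decide (e ≤ m)) : Int)
      = (l.countP (fun e => decide (a ≤ e) && decide (e ≤ m - 1)) : Int)
        + (l.countP (fun e => decide (e = m)) : Int) := by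
  induction l with
  | nil => simp
  | cons e l ih =>
    rw [List.countP_cons, List.countP_cons, List.countP_cons]
    push_cast
    rw [ih]
    have hsplit : (if (decide (a ≤ e) && decide (e ≤ m)) = true then (1:Int) else 0)
        = (if (decide (a ≤ e) && decide (e ≤ m - 1)) = true then 1 else 0)
          + (if decide (e = m) = true then 1 else 0) := by
      simp only [Bool.and_eq_true, decide_eq_true_eq]
      split_ifs <;> omega
    rw [hsplit]
    ring

-- the step indicator of pvP splits into the periodic indicator plus the extras hit
theorem pvP_split (m : Int) :
    ((if pvP m then (1:Int) else 0))
      = (if pvQ m then 1 else 0) + (pvExtras.countP (fun e => decide (e = m)) : Int) := by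
  by_cases hmem : m = 31 ∨ m = 32 ∨ m = 34 ∨ m = 35 ∨ m = 37 ∨ m = 38 ∨
      m = 61 ∨ m = 62 ∨ m = 64 ∨ m = 65 ∨ m = 67 ∨ m = 68 ∨
      m = 91 ∨ m = 92 ∨ m = 94 ∨ m = 95 ∨ m = 97 ∨ m = 98
  · -- m is one of the 18 extras: a closed computation for each
    rcases hmem with rfl | rfl | rfl | rfl | rfl | rfl | rfl | rfl | rfl | rfl | rfl | rfl |
      rfl | rfl | rfl | rfl | rfl | rfl <;> decide
  · -- m is none of the extras: no extra matches, and pvP coincides with pvQ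
    have hzero : pvExtras.countP (fun e => decide (e = m)) = 0 := by
      rw [List.countP_eq_zero]
      intro e he
      simp only [pvExtras, List.mem_cons, List.not_mem_nil, or_false] at he
      simp only [decide_eq_true_eq]
      omega
    rw [hzero]
    simp only [Nat.cast_zero, add_zero]
    by_cases hq : pvQ m
    · have hp : pvP m := by
        unfold pvQ at hq; unfold pvP; tauto
      rw [if_pos hp, if_pos hq]
    · have hp : ¬ pvP m := by
        unfold pvQ at hq; unfold pvP
        push_neg at hq ⊢
        refine ⟨?_, ?_, ?_, hq.2.1, hq.2.2.1, hq.2.2.2, hq.1⟩ <;> omega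
      rw [if_neg hp, if_neg hq]

-- the whole loop versus the closed form, by induction on the length of the range
theorem pv_main (a : Int) (k : Nat) :
    (PySem.List.pyRange a (a + k) 1).foldl
        (fun counter i => if pvP i then counter + 1 else counter) 0
      = pvG (a + k - 1) - pvG (a - 1)
        + (pvExtras.countP (fun e => decide (a ≤ e) && decide (e ≤ a + k - 1)) : Int) := by
  induction k with
  | zero =>
    have hnil : PySem.List.pyRange a (a + (0:Nat)) 1 = [] :=
      PySem.List.pyRange_one_eq_nil (by omega)
    have hz : pvExtras.countP (fun e => decide (a ≤ e) && decide (e ≤ a + (0:Nat) - 1)) = 0 := by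
      rw [List.countP_eq_zero]
      intro e _
      simp only [Bool.and_eq_true, decide_eq_true_eq, not_and]
      omega
    rw [hnil, hz]
    simp
  | succ k ih =>
    have hm : a ≤ a + (k : Int) := by omega
    have hsplit : PySem.List.pyRange a (a + (k + 1 : Nat)) 1
        = PySem.List.pyRange a (a + k) 1 ++ [a + k] := by
      have h := PySem.List.pyRange_one_succ_right (show a ≤ a + (k : Int) from hm)
      rw [show (a + (k + 1 : Nat) : Int) = (a + k) + 1 by push_cast; ring]
      exact h
    rw [hsplit, List.foldl_append, ih]
    simp only [List.foldl]
    have e1 : (a + (k + 1 : Nat) : Int) - 1 = a + k := by push_cast; ring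
    have hstep := pvExtras_step a (a + (k : Int)) hm pvExtras
    have hG := pvG_step (a + (k : Int))
    have hP := pvP_split (a + (k : Int))
    rw [e1]
    by_cases hp : pvP (a + (k : Int)) <;> by_cases hq : pvQ (a + (k : Int)) <;>
      simp only [hp, hq, if_true, if_false] at hP hG ⊢ <;>
      omega

-- ===== VERDICT (by name: the statement is the Claim_ definition above) =====
theorem count_func_spec : Claim_equal_count_func := by
  intro a b _
  unfold Spec_count_func count_func count_func_alt
  have hbody : (fun (counter i : Int) =>
      if tsn i then counter + 1
      else if PySem.Int.mod i 3 = 0 then counter + 1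
      else counter) = fun counter i => if pvP i then counter + 1 else counter := by
    funext counter i
    exact pv_body_eq counter i
  rw [hbody]
  by_cases hab : a > b
  · rw [if_pos hab]
    rw [PySem.List.pyRange_one_eq_nil (by omega)]
    simp
  · rw [if_neg hab]
    have hk : ∃ k : Nat, b + 1 = a + k := ⟨(b + 1 - a).toNat, by omega⟩
    obtain ⟨k, hkeq⟩ := hk
    have := pv_main a k
    rw [← hkeq] at this
    rw [this]
    have e : b + 1 - 1 = b := by ring
    rw [e]
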